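-- pv_equiv track=rewrite | github.com/Junebugg1214/Cortex-AI | cortex/release.py | _operation_entries
-- ===== SOURCE A (Python) =====
-- from typing import Any
--
-- def _operation_entries(spec: dict[str, Any]) -> list[dict[str, str]]:
--     entries: list[dict[str, str]] = []
--     for path, operations in sorted((spec.get("paths") or {}).items()):
--         if not isinstance(operations, dict):
--             continue
--         for method, operation in sorted(operations.items()):
--             if not isinstance(operation, dict):
--                 continue
--             entries.append(
--                 {
--                     "method": method.upper(),
--                     "path": str(path),
--                     "operation_id": str(operation.get("operationId", "")),
--                     "summary": str(operation.get("summary", "")),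
--                 }
--             )
--     return entries
-- ===== SOURCE B (Python) =====
-- from typing import Any
--
-- def _entry(path: str, method: str, operation: dict) -> dict[str, str]:
--     return {
--         "method": method.upper(),
--         "path": str(path),
--         "operation_id": str(operation.get("operationId", "")),
--         "summary": str(operation.get("summary", "")),
--     }
--
-- def _operation_entries(spec: dict[str, Any]) -> list[dict[str, str]]:
--     # Build every entry first, keyed by its (path, method) pair, via one nested
--     # comprehension over the UNSORTED dicts; then one global sort of the keyed
--     # pairs by the (path, method) tuple; finally project the entries out.
--     paths = spec.get("paths") or {}
--     keyed = [
--         ((path, method), _entry(path, method, operation))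
--         for path, operations in paths.items() if isinstance(operations, dict)
--         for method, operation in operations.items() if isinstance(operation, dict)
--     ]
--     keyed.sort(key=lambda kv: kv[0])
--     return [entry for _, entry in keyed]
-- ===== Notes on version B (the rewrite author's own statement) =====
-- stated objective: alternative
-- what changed: Instead of A's nested sorted() loops appending entries, B builds every entry up front keyed by its (path, method) pair in one nested comprehension over the unsorted dicts, performs a single global sort of the keyed pairs by that tuple, and then projects the entries out.
import Mathlib
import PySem

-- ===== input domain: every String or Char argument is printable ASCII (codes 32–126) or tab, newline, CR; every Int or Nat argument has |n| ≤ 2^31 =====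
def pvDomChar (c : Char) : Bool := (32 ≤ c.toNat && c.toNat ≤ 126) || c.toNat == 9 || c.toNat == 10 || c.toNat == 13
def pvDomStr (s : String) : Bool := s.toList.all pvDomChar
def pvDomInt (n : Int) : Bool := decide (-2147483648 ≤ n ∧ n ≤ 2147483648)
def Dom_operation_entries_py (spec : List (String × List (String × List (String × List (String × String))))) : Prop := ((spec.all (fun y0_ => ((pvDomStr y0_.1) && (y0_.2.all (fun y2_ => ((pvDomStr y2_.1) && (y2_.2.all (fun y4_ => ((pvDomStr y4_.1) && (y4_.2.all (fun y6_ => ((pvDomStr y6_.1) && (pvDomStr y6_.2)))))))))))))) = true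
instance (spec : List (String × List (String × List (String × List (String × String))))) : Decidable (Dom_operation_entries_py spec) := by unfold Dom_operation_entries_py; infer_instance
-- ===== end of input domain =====

-- B builds every entry up front keyed by its (path, method) pair, does ONE global sort of
-- the keyed pairs, and projects the entries — an alternative decomposition, same cost.
-- The static types make Python's isinstance(..., dict) checks always true, so the ports omit them.
-- sorted(d.items()) over a dict is ported as a stable sort by key (dict keys are unique,
-- so Python's tuple comparison never reaches the second component) — exact here.

-- ===== PORT A =====
-- Nested loops: for each path (sorted), for each method (sorted), append one entry dict.
def operation_entries_py (spec : List (String × List (String × List (String × List (String × String))))) : List (List (String × String)) :=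
  let paths := (PySem.Dict.ofList spec).getD "paths" []
  (PySem.List.sorted (PySem.Dict.ofList paths).items (fun p => p.1)).foldl
    (fun entries pOps =>
      (PySem.List.sorted (PySem.Dict.ofList pOps.2).items (fun p => p.1)).foldl
        (fun entries mOp =>
          entries ++ [[("method", PySem.Str.upper mOp.1), ("path", pOps.1),
                       ("operation_id", (PySem.Dict.ofList mOp.2).getD "operationId" ""),
                       ("summary", (PySem.Dict.ofList mOp.2).getD "summary" "")]])
        entries)
    []

-- ===== PORT B =====
-- _entry helper: the finished entry dict for one (path, method, operation).
def pvEntry (path : String) (method : String) (operation : List (String × String)) : List (String × String) :=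
  [("method", PySem.Str.upper method), ("path", path),
   ("operation_id", (PySem.Dict.ofList operation).getD "operationId" ""),
   ("summary", (PySem.Dict.ofList operation).getD "summary" "")]

-- Nested comprehension over the UNSORTED dicts producing ((path, method), entry) pairs,
-- one global tuple-key sort, then a projection to the entries.
def operation_entries_py_alt (spec : List (String × List (String × List (String × List (String × String))))) : List (List (String × String)) :=
  let paths := (PySem.Dict.ofList spec).getD "paths" []
  let keyed := (PySem.Dict.ofList paths).items.flatMap
      (fun pOps => (PySem.Dict.ofList pOps.2).items.map
        (fun mOp => ((pOps.1, mOp.1), pvEntry pOps.1 mOp.1 mOp.2)))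
  (PySem.List.sorted2 keyed (fun kv => kv.1.1) (fun kv => kv.1.2)).map Prod.snd

-- ===== PRECONDITION & SPEC =====
def Spec_operation_entries_py (spec : List (String × List (String × List (String × List (String × String))))) (out : List (List (String × String))) : Prop := out = operation_entries_py_alt spec
instance (spec : List (String × List (String × List (String × List (String × String))))) (out : List (List (String × String))) : Decidable (Spec_operation_entries_py spec out) := by unfold Spec_operation_entries_py; infer_instance

-- ===== CLAIM (what is proved, stated in full; the proofs are below) =====
def Claim_equal_operation_entries_py : Prop := ∀ (spec : List (String × List (String × List (String × List (String × String))))), Dom_operation_entries_py spec → Spec_operation_entries_py spec (operation_entries_py spec)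

-- ===== LEMMAS AND PROOFS =====

-- sorted2 with string keys is sorted with the lexicographic pair key.
theorem sorted2_eq_sorted_lex {α : Type} (xs : List α) (k1 k2 : α → String) :
    PySem.List.sorted2 xs k1 k2 = PySem.List.sorted xs (fun a => toLex (k1 a, k2 a)) := by
  have hb : (fun a b => decide (k1 a < k1 b) || (!decide (k1 b < k1 a) && decide (k2 a < k2 b)))
      = (fun a b : α => decide ((toLex (k1 a, k2 a)) < toLex (k1 b, k2 b))) := by
    funext a b
    rcases lt_trichotomy (k1 a) (k1 b) with h | h | h
    · simp [h, Prod.Lex.lt_iff, not_lt_of_gt h]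
    · simp [h, Prod.Lex.lt_iff]
    · simp [h, Prod.Lex.lt_iff, not_lt_of_gt h, ne_of_gt h]
  simp only [PySem.List.sorted2, PySem.List.sorted, hb]
  rfl

-- A stable sort by a key that is duplicate-free is strictly increasing in the key.
theorem sorted_pairwise_lt_of_nodup {α κ : Type} [LinearOrder κ] (xs : List α) (key : α → κ)
    (h : (xs.map key).Nodup) :
    (PySem.List.sorted xs key).Pairwise (fun a b => key a < key b) := by
  have hle := PySem.List.sorted_pairwise xs key
  have hnd : ((PySem.List.sorted xs key).map key).Nodup :=
    (((PySem.List.sorted_perm xs key false).map key).nodup_iff).mpr h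
  have hne : (PySem.List.sorted xs key).Pairwise (fun a b => key a ≠ key b) :=
    List.pairwise_map.mp hnd
  exact (hle.and hne).imp (fun h => lt_of_le_of_ne h.1 h.2)

-- The one global (path, method)-key sort of the flat keyed-pair list equals the nested
-- sorts, given duplicate-free outer keys (inner keys are Dict keys, duplicate-free).
theorem flat_sorted {α β : Type} (P : List (String × List (String × α))) (f : String → String → α → β)
    (hP : (P.map Prod.fst).Nodup) :
    PySem.List.sorted
        (P.flatMap (fun pr => (PySem.Dict.ofList pr.2).items.map
          (fun m => ((pr.1, m.1), f pr.1 m.1 m.2))))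
        (fun kv => toLex kv.1)
      = (PySem.List.sorted P (fun p => p.1)).flatMap
          (fun pr => (PySem.List.sorted (PySem.Dict.ofList pr.2).items (fun p => p.1)).map
            (fun m => ((pr.1, m.1), f pr.1 m.1 m.2))) := by
  apply PySem.List.sorted_eq_of_perm_of_pairwise_lt
  · exact List.Perm.flatMap (PySem.List.sorted_perm P (fun p => p.1) false)
      (fun pr _ => ((PySem.List.sorted_perm (PySem.Dict.ofList pr.2).items (fun p => p.1) false).map _))
  · rw [List.pairwise_flatMap]
    constructor
    · intro pr _
      rw [List.pairwise_map]
      have hnd : ((PySem.Dict.ofList pr.2).items.map Prod.fst).Nodup :=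
        PySem.Dict.nodup_keys_ofList pr.2
      have := sorted_pairwise_lt_of_nodup (PySem.Dict.ofList pr.2).items (fun p => p.1) hnd
      exact this.imp (fun h => by
        simp only [Prod.Lex.lt_iff]
        exact Or.inr ⟨rfl, h⟩)
    · have hout := sorted_pairwise_lt_of_nodup P (fun p => p.1) hP
      refine hout.imp (fun {a b} hab => ?_)
      intro x hx y hy
      simp only [List.mem_map] at hx hy
      obtain ⟨mx, _, rfl⟩ := hx
      obtain ⟨my, _, rfl⟩ := hy
      simp only [Prod.Lex.lt_iff]
      exact Or.inl hab

-- ===== VERDICT (by name: the statement is the Claim_ definition above) =====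
theorem operation_entries_py_spec : Claim_equal_operation_entries_py := by
  intro spec _
  unfold Spec_operation_entries_py operation_entries_py operation_entries_py_alt
  simp only [PySem.List.foldl_append_singleton_eq_map, PySem.List.foldl_append_eq_flatMap,
    List.nil_append]
  rw [sorted2_eq_sorted_lex]
  rw [flat_sorted _ _ (PySem.Dict.nodup_keys_ofList _)]
  rw [List.map_flatMap]
  simp only [List.map_map, Function.comp_def, pvEntry]
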